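-- pv_equiv track=rewrite | github.com/sorahjy/financial-analysis | stock_sorahjy_index.py | rank_desc
-- ===== SOURCE A (Python) =====
-- def rank_desc(values):
--     """降序排名 (值最大排名为1)，None 排最后"""
--     n = len(values)
--     indexed = list(enumerate(values))
--     indexed.sort(key=lambda x: (x[1] is None, -(x[1] if x[1] is not None else 0)))
--     ranks = [0] * n
--     for rank_pos, (idx, _) in enumerate(indexed):
--         ranks[idx] = rank_pos + 1
--     return ranks
-- ===== SOURCE B (Python) =====
-- def rank_desc(values):
--     """降序排名 (值最大排名为1)，None 排最后 — computed by counting instead of sorting"""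
--     non_none = sum(1 for v in values if v is not None)
--     ranks = []
--     none_seen = 0
--     for i, v in enumerate(values):
--         if v is None:
--             ranks.append(non_none + 1 + none_seen)
--             none_seen += 1
--         else:
--             better = 0
--             for j, w in enumerate(values):
--                 if w is not None and (w > v or (w == v and j < i)):
--                     better += 1
--             ranks.append(1 + better)
--     return ranks
-- ===== Notes on version B (the rewrite author's own statement) =====
-- stated objective: alternative
-- what changed: B replaces A's stable sort of (index,value) pairs followed by a scatter into a rank array by a direct per-element count: each rank is 1 + the number of entries the stable sort would place strictly earlier (greater value, equal value with smaller index, or for None entries all non-None values plus earlier Nones).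
import Mathlib
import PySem

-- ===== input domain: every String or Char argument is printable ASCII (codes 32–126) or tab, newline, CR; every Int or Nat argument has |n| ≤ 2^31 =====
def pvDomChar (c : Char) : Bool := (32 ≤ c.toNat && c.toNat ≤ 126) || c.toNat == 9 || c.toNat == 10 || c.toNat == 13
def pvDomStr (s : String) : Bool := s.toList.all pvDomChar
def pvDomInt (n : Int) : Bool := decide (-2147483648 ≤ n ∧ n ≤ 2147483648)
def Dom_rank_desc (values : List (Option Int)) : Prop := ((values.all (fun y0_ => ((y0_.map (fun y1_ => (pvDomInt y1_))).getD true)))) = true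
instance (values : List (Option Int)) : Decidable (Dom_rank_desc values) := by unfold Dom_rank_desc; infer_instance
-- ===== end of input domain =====

-- B replaces A's stable sort-then-scatter by direct counting: each rank is 1 + the number of
-- entries that A's sort would place strictly earlier (objective: alternative, same result).

-- ===== PORT A =====
def rank_desc (values : List (Option Int)) : List Int :=
  let n : Int := values.length
  let indexed := PySem.List.enumerate values
  let sortedIndexed :=
    PySem.List.sorted2 indexed (fun x => x.2.isNone) (fun x => -(x.2.getD 0))
  let ranks := PySem.List.pyRepeat [(0 : Int)] n
  (PySem.List.enumerate sortedIndexed).foldl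
    (fun r q => PySem.List.pySetD r q.2.1 (q.1 + 1)) ranks

-- ===== PORT B =====
-- inner counting loop of B: how many non-None entries rank strictly better than v at index i
def pvInner (values : List (Option Int)) (i : Int) (v : Int) : Int :=
  (PySem.List.enumerate values).foldl
    (fun b q =>
      match q.2 with
      | some w => if w > v ∨ (w = v ∧ q.1 < i) then b + 1 else b
      | none => b) 0

def rank_desc_alt (values : List (Option Int)) : List Int :=
  let nonNone : Int := (values.map (fun v => if v.isSome then (1 : Int) else 0)).sum
  ((PySem.List.enumerate values).foldl
    (fun st p =>
      match p.2 with
      | none => (st.1 ++ [nonNone + 1 + st.2], st.2 + 1)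
      | some v => (st.1 ++ [1 + pvInner values p.1 v], st.2))
    (([] : List Int), (0 : Int))).1

-- ===== PRECONDITION & SPEC =====
def Spec_rank_desc (values : List (Option Int)) (out : List Int) : Prop := out = rank_desc_alt values
instance (values : List (Option Int)) (out : List Int) : Decidable (Spec_rank_desc values out) := by unfold Spec_rank_desc; infer_instance

-- ===== CLAIM (what is proved, stated in full; the proofs are below) =====
def Claim_equal_rank_desc : Prop := ∀ (values : List (Option Int)), Dom_rank_desc values → Spec_rank_desc values (rank_desc values)

-- ===== LEMMAS AND PROOFS =====

-- the boolean "strictly before" test A's sort uses (lexicographic on (isNone, -value))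
def pvLt (a b : Int × Option Int) : Bool :=
  decide ((fun x : Int × Option Int => x.2.isNone) a < (fun x : Int × Option Int => x.2.isNone) b) ||
    (!decide ((fun x : Int × Option Int => x.2.isNone) b < (fun x : Int × Option Int => x.2.isNone) a) &&
      decide ((fun x : Int × Option Int => -(x.2.getD 0)) a < (fun x : Int × Option Int => -(x.2.getD 0)) b))

-- the stable order A's sort realises: key strictly less, or tie broken by original index
def pvRb (a b : Int × Option Int) : Bool :=
  pvLt a b || (!pvLt a b && !pvLt b a && decide (a.1 < b.1))

lemma pvLt_irrefl (a : Int × Option Int) : pvLt a a = false := by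
  obtain ⟨i, (_|v)⟩ := a <;> simp [pvLt]

lemma pvRb_irrefl (a : Int × Option Int) : pvRb a a = false := by
  simp [pvRb, pvLt_irrefl]

lemma pvRb_asymm (a b : Int × Option Int) (h : pvRb a b = true) : pvRb b a = false := by
  obtain ⟨i, (_|v)⟩ := a <;> obtain ⟨j, (_|w)⟩ := b <;>
    simp_all [pvRb, pvLt, Bool.lt_iff] <;> omega

lemma pvLt_Rb_trans (a b c : Int × Option Int) (h1 : pvLt a b = true) (h2 : pvRb b c = true) :
    pvLt a c = true := by
  obtain ⟨i, (_|v)⟩ := a <;> obtain ⟨j, (_|w)⟩ := b <;> obtain ⟨k, (_|u)⟩ := c <;>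
    simp_all [pvRb, pvLt, Bool.lt_iff] <;> omega

lemma insertBy_pairwise (x : Int × Option Int) (ys : List (Int × Option Int))
    (hp : ys.Pairwise (fun a b => pvRb a b = true)) (hfst : ∀ y ∈ ys, y.1 < x.1) :
    (PySem.List.insertBy pvLt x ys).Pairwise (fun a b => pvRb a b = true) := by
  induction ys with
  | nil => simp [PySem.List.insertBy]
  | cons y ys ih =>
    rw [show PySem.List.insertBy pvLt x (y :: ys) =
      if pvLt x y then x :: y :: ys else y :: PySem.List.insertBy pvLt x ys from by
        simp [PySem.List.insertBy]]
    rcases hp with _ | ⟨hyz, hp'⟩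
    by_cases hxy : pvLt x y = true
    · rw [if_pos hxy]
      refine List.Pairwise.cons ?_ (List.Pairwise.cons hyz hp')
      intro z hz
      rcases List.mem_cons.mp hz with rfl | hz
      · simp [pvRb, hxy]
      · have := pvLt_Rb_trans x y z hxy (hyz z hz)
        simp [pvRb, this]
    · rw [if_neg hxy]
      refine List.Pairwise.cons ?_ (ih hp' (fun y' hy' => hfst y' (List.mem_cons_of_mem _ hy')))
      intro z hz
      rcases (PySem.List.mem_insertBy pvLt x z ys).mp hz with rfl | hz
      · have hyx : y.1 < z.1 := hfst y (List.mem_cons_self)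
        by_cases h : pvLt y z = true
        · simp [pvRb, h]
        · simp only [Bool.not_eq_true] at hxy h
          simp [pvRb, h, hxy, hyx]
      · exact hyz z hz

lemma foldl_insertBy_pairwise (xs : List (Int × Option Int)) :
    ∀ (acc : List (Int × Option Int)), acc.Pairwise (fun a b => pvRb a b = true) →
    (∀ x ∈ xs, ∀ y ∈ acc, y.1 < x.1) → xs.Pairwise (fun a b => a.1 < b.1) →
    (xs.foldl (fun acc x => PySem.List.insertBy pvLt x acc) acc).Pairwise
      (fun a b => pvRb a b = true) := by
  induction xs with
  | nil => intro acc h _ _; simpa using h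
  | cons x xs ih =>
    intro acc hacc hfst hpw
    rcases hpw with _ | ⟨hx, hpw'⟩
    simp only [List.foldl_cons]
    refine ih _ (insertBy_pairwise x acc hacc (fun y hy => hfst x List.mem_cons_self y hy)) ?_ hpw'
    intro x' hx' y hy
    rcases (PySem.List.mem_insertBy pvLt x y acc).mp hy with rfl | hy
    · exact hx x' hx'
    · exact hfst x' (List.mem_cons_of_mem _ hx') y hy

-- the sorted list A builds
def pvS (values : List (Option Int)) : List (Int × Option Int) :=
  PySem.List.sorted2 (PySem.List.enumerate values) (fun x => x.2.isNone) (fun x => -(x.2.getD 0))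

lemma pvS_eq_foldl (values : List (Option Int)) :
    pvS values = (PySem.List.enumerate values).foldl
      (fun acc x => PySem.List.insertBy pvLt x acc) [] := by
  rfl

lemma pvS_pairwise (values : List (Option Int)) :
    (pvS values).Pairwise (fun a b => pvRb a b = true) := by
  rw [pvS_eq_foldl]
  exact foldl_insertBy_pairwise _ _ (by simp) (by simp) (PySem.List.pairwise_lt_enumerate _ _)

lemma pvS_perm (values : List (Option Int)) :
    (pvS values).Perm (PySem.List.enumerate values) :=
  PySem.List.sorted2_perm _ _ _ _

-- A's scatter loop, as structural recursion
def pvFill : List (Int × Option Int) → List Int → Int → List Int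
  | [], r, _ => r
  | p :: S, r, k => pvFill S (PySem.List.pySetD r p.1 (k + 1)) (k + 1)

lemma foldl_set_eq_pvFill (S : List (Int × Option Int)) :
    ∀ (r : List Int) (k : Int),
    (PySem.List.enumerate S k).foldl (fun r q => PySem.List.pySetD r q.2.1 (q.1 + 1)) r
      = pvFill S r k := by
  induction S with
  | nil => intro r k; rfl
  | cons p S ih =>
    intro r k
    rw [PySem.List.enumerate_cons, List.foldl_cons, pvFill, ih]

lemma pvFill_length (S : List (Int × Option Int)) :
    ∀ (r : List Int) (k : Int), (pvFill S r k).length = r.length := by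
  induction S with
  | nil => intro r k; rfl
  | cons p S ih =>
    intro r k
    rw [pvFill, ih, PySem.List.length_pySetD]

lemma rank_desc_eq (values : List (Option Int)) :
    rank_desc values = pvFill (pvS values) (List.replicate values.length 0) 0 := by
  unfold rank_desc
  simp only [PySem.List.pyRepeat_singleton, Int.toNat_natCast]
  rw [foldl_set_eq_pvFill]
  rfl

lemma pvFill_get_miss (S : List (Int × Option Int)) :
    ∀ (r : List Int) (k : Int) (i : Nat), (∀ q ∈ S, 0 ≤ q.1 ∧ q.1 ≠ (i : Int)) →
    (pvFill S r k)[i]? = r[i]? := by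
  induction S with
  | nil => intro r k i _; rfl
  | cons p S ih =>
    intro r k i hq
    obtain ⟨hp0, hpi⟩ := hq p List.mem_cons_self
    rw [pvFill, ih _ _ _ (fun q hq' => hq q (List.mem_cons_of_mem _ hq')),
      PySem.List.pySetD_of_nonneg _ _ hp0, List.getElem?_set_ne]
    omega

lemma pvFill_get_hit (S : List (Int × Option Int)) :
    ∀ (r : List Int) (k : Int) (i : Nat) (e : Int × Option Int), e ∈ S → e.1 = (i : Int) →
    S.Pairwise (fun a b => pvRb a b = true) → (S.map (·.1)).Nodup →
    (∀ q ∈ S, 0 ≤ q.1) → i < r.length →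
    (pvFill S r k)[i]? = some (k + 1 + (S.countP (fun x => pvRb x e) : Int)) := by
  induction S with
  | nil => intro r k i e he; exact absurd he (List.not_mem_nil)
  | cons p S ih =>
    intro r k i e he hei hpw hnd hpos hir
    rcases hpw with _ | ⟨hpz, hpw'⟩
    rcases hnd with _ | ⟨hpnd, hnd'⟩
    rcases List.mem_cons.mp he with rfl | he'
    · have hmiss : ∀ q ∈ S, 0 ≤ q.1 ∧ q.1 ≠ (i : Int) := by
        intro q hq
        refine ⟨hpos q (List.mem_cons_of_mem _ hq), ?_⟩
        intro hcon
        exact hpnd q.1 (List.mem_map_of_mem hq) (by rw [hcon, ← hei])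
      rw [pvFill, pvFill_get_miss S _ _ _ hmiss,
        PySem.List.pySetD_of_nonneg _ _ (hpos e List.mem_cons_self), hei,
        Int.toNat_natCast, List.getElem?_set_self hir]
      have hcount : (e :: S).countP (fun x => pvRb x e) = 0 := by
        rw [List.countP_cons, List.countP_eq_zero.mpr, pvRb_irrefl]
        · rfl
        · intro z hz
          simp [pvRb_asymm e z (hpz z hz)]
      rw [hcount]
      norm_num
    · have hlen : i < (PySem.List.pySetD r p.1 (k + 1)).length := by
        rw [PySem.List.length_pySetD]; exact hir
      rw [pvFill, ih _ _ _ _ he' hei hpw' hnd'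
        (fun q hq => hpos q (List.mem_cons_of_mem _ hq)) hlen]
      have hpe : pvRb p e = true := hpz e he'
      simp only [List.countP_cons, hpe, if_pos]
      congr 1
      push_cast
      ring

-- ---- B side ----

def pvNN (values : List (Option Int)) : Int :=
  (values.map (fun v => if v.isSome then (1 : Int) else 0)).sum

def pvOut (nn : Int) (values : List (Option Int)) :
    List (Option Int) → Int → Int → List Int
  | [], _, _ => []
  | none :: t, s, c => (nn + 1 + c) :: pvOut nn values t (s + 1) (c + 1)
  | some v :: t, s, c => (1 + pvInner values s v) :: pvOut nn values t (s + 1) c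

lemma B_loop (nn : Int) (values : List (Option Int)) (t : List (Option Int)) :
    ∀ (s c : Int) (acc : List Int),
    (PySem.List.enumerate t s).foldl
      (fun st p =>
        match p.2 with
        | none => (st.1 ++ [nn + 1 + st.2], st.2 + 1)
        | some v => (st.1 ++ [1 + pvInner values p.1 v], st.2)) (acc, c)
      = (acc ++ pvOut nn values t s c, c + (t.countP (fun v => v.isNone) : Int)) := by
  induction t with
  | nil => intro s c acc; simp [PySem.List.enumerate_nil, pvOut]
  | cons v t ih =>
    intro s c acc
    rcases v with _ | v <;>
      simp [PySem.List.enumerate_cons, pvOut, ih, List.countP_cons] <;> push_cast <;> ring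


lemma rank_desc_alt_eq (values : List (Option Int)) :
    rank_desc_alt values = pvOut (pvNN values) values values 0 0 := by
  unfold rank_desc_alt
  simp only []
  rw [B_loop]
  simp [pvNN]

lemma pvOut_length (nn : Int) (values : List (Option Int)) (t : List (Option Int)) :
    ∀ (s c : Int), (pvOut nn values t s c).length = t.length := by
  induction t with
  | nil => intro s c; rfl
  | cons v t ih =>
    intro s c
    rcases v with _ | v <;> simp [pvOut, ih]

lemma pvOut_get (nn : Int) (values : List (Option Int)) (t : List (Option Int)) :
    ∀ (s c : Int) (i : Nat) (hi : i < t.length),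
    (pvOut nn values t s c)[i]? =
      some (match t[i] with
        | none => nn + 1 + c + ((t.take i).countP (fun v => v.isNone) : Int)
        | some v => 1 + pvInner values (s + i) v) := by
  induction t with
  | nil => intro s c i hi; exact absurd hi (by simp)
  | cons v t ih =>
    intro s c i hi
    rcases i with _ | i
    · rcases v with _ | v <;> simp [pvOut]
    · have hi' : i < t.length := by simpa using hi
      rcases v with _ | v
      · rw [pvOut, List.getElem?_cons_succ, ih _ _ _ hi']
        simp only [List.getElem_cons_succ, List.take_succ_cons, List.countP_cons]
        rcases t[i] with _ | w <;> simp <;> push_cast <;> ring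
      · rw [pvOut, List.getElem?_cons_succ, ih _ _ _ hi']
        simp only [List.getElem_cons_succ, List.take_succ_cons, List.countP_cons]
        rcases t[i] with _ | w <;> simp <;> norm_num <;> push_cast <;> ring_nf


-- ---- counting the stable order ----

lemma pvInner_eq (values : List (Option Int)) (i : Int) (v : Int) :
    pvInner values i v =
      ((PySem.List.enumerate values).countP
        (fun x => match x.2 with
          | some w => decide (w > v ∨ (w = v ∧ x.1 < i))
          | none => false) : Int) := by
  unfold pvInner
  rw [show (fun (b : Int) (q : Int × Option Int) =>
      match q.2 with
      | some w => if w > v ∨ (w = v ∧ q.1 < i) then b + 1 else b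
      | none => b)
    = (fun (b : Int) (q : Int × Option Int) =>
        if (match q.2 with
            | some w => decide (w > v ∨ (w = v ∧ q.1 < i))
            | none => false) = true then b + 1 else b) from by
      funext b q
      rcases q with ⟨j, (_|w)⟩ <;> simp]
  rw [PySem.List.foldl_count_if]
  ring

lemma pvRb_some (x : Int × Option Int) (i : Int) (v : Int) :
    pvRb x (i, some v) =
      (match x.2 with
        | some w => decide (w > v ∨ (w = v ∧ x.1 < i))
        | none => false) := by
  obtain ⟨j, (_|w)⟩ := x
  · simp [pvRb, pvLt, Bool.lt_iff]
  · simp only [pvRb, pvLt, Bool.lt_iff]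
    rw [Bool.eq_iff_iff]; simp; omega

lemma pvRb_none (x : Int × Option Int) (i : Int) :
    pvRb x (i, none) = (x.2.isSome || (x.2.isNone && decide (x.1 < i))) := by
  obtain ⟨j, (_|w)⟩ := x <;> simp [pvRb, pvLt, Bool.lt_iff]

lemma countP_none_split (t : List (Option Int)) :
    ∀ (s i : Int),
    (PySem.List.enumerate t s).countP (fun x => x.2.isSome || (x.2.isNone && decide (x.1 < i)))
      = t.countP (fun v => v.isSome)
        + (PySem.List.enumerate t s).countP (fun x => x.2.isNone && decide (x.1 < i)) := by
  induction t with
  | nil => intro s i; rfl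
  | cons v t ih =>
    intro s i
    rcases v with _ | v <;>
      simp [PySem.List.enumerate_cons, List.countP_cons, ih] <;> omega

lemma countP_none_lt (t : List (Option Int)) :
    ∀ (s : Int) (i : Nat),
    (PySem.List.enumerate t s).countP (fun x => x.2.isNone && decide (x.1 < s + (i : Int)))
      = (t.take i).countP (fun v => v.isNone) := by
  induction t with
  | nil => intro s i; simp [PySem.List.enumerate_nil]
  | cons v t ih =>
    intro s i
    rcases i with _ | i
    · simp only [Nat.cast_zero, add_zero]
      rw [List.countP_eq_zero.mpr, List.take_zero, List.countP_nil]
      intro x hx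
      rcases (PySem.List.mem_enumerate_iff _ _ _).mp hx with ⟨k, hk, rfl⟩
      simp only [Bool.and_eq_true, decide_eq_true_eq]
      rintro ⟨-, h⟩
      rcases k with _ | k <;> omega
    · rw [PySem.List.enumerate_cons, List.countP_cons, List.take_succ_cons, List.countP_cons]
      rw [show (PySem.List.enumerate t (s + 1)).countP
            (fun x => x.2.isNone && decide (x.1 < s + ((i + 1 : Nat) : Int)))
          = (PySem.List.enumerate t (s + 1)).countP
            (fun x => x.2.isNone && decide (x.1 < (s + 1) + (i : Int))) from by
        congr 1
        funext x
        congr 1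
        rw [Bool.eq_iff_iff]
        simp only [decide_eq_true_eq]
        push_cast
        omega]
      rw [ih]
      rcases v with _ | v <;> simp <;> omega

lemma main_eq (values : List (Option Int)) : rank_desc values = rank_desc_alt values := by
  rw [rank_desc_eq, rank_desc_alt_eq]
  apply List.ext_getElem?
  intro i
  by_cases hi : i < values.length
  · have hlenA : i < (List.replicate values.length (0 : Int)).length := by simpa using hi
    have heS : ((i : Int), values[i]) ∈ pvS values := by
      rw [(pvS_perm values).mem_iff, PySem.List.mem_enumerate_iff]
      exact ⟨i, hi, by simp⟩
    have hnd : ((pvS values).map (fun x => x.1)).Nodup := by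
      refine ((pvS_perm values).map (fun x => x.1)).symm.nodup ?_
      rw [PySem.List.map_fst_enumerate]
      rw [show (0 : Int) + (values.length : Int) = (values.length : Int) by ring]
      rw [PySem.List.pyRange_zero_natCast]
      exact (List.nodup_range).map (fun a b h => by exact_mod_cast h)
    have hpos : ∀ q ∈ pvS values, 0 ≤ q.1 := by
      intro q hq
      rcases (PySem.List.mem_enumerate_iff _ _ _).mp ((pvS_perm values).mem_iff.mp hq)
        with ⟨k, hk, rfl⟩
      simp
    rw [pvFill_get_hit (pvS values) _ 0 i ((i : Int), values[i]) heS rfl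
        (pvS_pairwise values) hnd hpos hlenA,
      pvOut_get _ _ _ 0 0 i hi,
      (pvS_perm values).countP_eq]
    rcases hv : values[i] with _ | v
    · rw [show (fun x => pvRb x ((i : Int), none))
          = (fun x : Int × Option Int => (x.2.isSome || (x.2.isNone && decide (x.1 < (i : Int)))))
          from funext (fun x => pvRb_none x _)]
      rw [countP_none_split,
        show (PySem.List.enumerate values).countP
            (fun x => x.2.isNone && decide (x.1 < (i : Int)))
          = (PySem.List.enumerate values).countP
            (fun x => x.2.isNone && decide (x.1 < 0 + (i : Int))) from by
          congr 1; funext x; congr 1; rw [Bool.eq_iff_iff]; simp,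
        countP_none_lt values 0 i]
      have hnn : pvNN values = ((values.countP (fun v => v.isSome) : Int)) :=
        PySem.List.sum_map_ite_one_zero _ _
      rw [hnn]
      congr 1
      push_cast
      ring
    · rw [show (fun x => pvRb x ((i : Int), some v))
          = (fun x : Int × Option Int =>
              (match x.2 with
                | some w => decide (w > v ∨ (w = v ∧ x.1 < (i : Int)))
                | none => false))
          from funext (fun x => pvRb_some x _ v)]
      rw [← pvInner_eq values (i : Int) v]
      simp
  · rw [List.getElem?_eq_none, List.getElem?_eq_none]
    · rw [pvOut_length]; omega
    · rw [pvFill_length, List.length_replicate]; omega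

-- ===== VERDICT (by name: the statement is the Claim_ definition above) =====
theorem rank_desc_spec : Claim_equal_rank_desc := by
  intro values _
  exact main_eq values
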